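/- GENERATED by farm/mkstatement.py from design/units.split.tsv — do not edit.
   THE SPLIT of the proof unit `start_decoder.9` into `start_decoder.9a`, `start_decoder.9b`, `start_decoder.9c`, `start_decoder.9d`, `start_decoder.9e`, `start_decoder.9f`: the children's statements give the parent's
   UNCHANGED statement (so nothing above the parent — callers, compositions — is touched by the split). -/
import Vorbis.Spec.StartDecoder9
import Vorbis.Spec.Units.start_decoder_9
import Vorbis.Spec.Units.start_decoder_9a
import Vorbis.Spec.Units.start_decoder_9b
import Vorbis.Spec.Units.start_decoder_9c
import Vorbis.Spec.Units.start_decoder_9d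
import Vorbis.Spec.Units.start_decoder_9e
import Vorbis.Spec.Units.start_decoder_9f
namespace Vorbis.Spec.Splits
open X86 X86.User Asan

/-- The children of the split unit `start_decoder.9` prove it, by `Vorbis.Spec.StartDecoder.Seg9.of_parts`. -/
theorem start_decoder_9
    (h_start_decoder_9a : Vorbis.Spec.start_decoder_9a.Statement)
    (h_start_decoder_9b : Vorbis.Spec.start_decoder_9b.Statement)
    (h_start_decoder_9c : Vorbis.Spec.start_decoder_9c.Statement)
    (h_start_decoder_9d : Vorbis.Spec.start_decoder_9d.Statement)
    (h_start_decoder_9e : Vorbis.Spec.start_decoder_9e.Statement)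
    (h_start_decoder_9f : Vorbis.Spec.start_decoder_9f.Statement) :
    Vorbis.Spec.start_decoder_9.Statement := by
  intro Lay _hLay μ _hμ u₀ _hcode _h_start_packet _h_crc32_init _h_get8_packet _h_error _h_asan_store1_noabort _h_vorbis_validate _h_get_bits _h_asan_store4_noabort _h_setup_malloc _h_asan_store8_noabort _h_asan_load4_noabort _h_memset
  apply Vorbis.Spec.StartDecoder.Seg9.of_parts
  · exact h_start_decoder_9a Lay _hLay μ _hμ u₀ _hcode _h_start_packet _h_crc32_init
  · exact h_start_decoder_9b Lay _hLay μ _hμ u₀ _hcode _h_get8_packet _h_error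
  · exact h_start_decoder_9c Lay _hLay μ _hμ u₀ _hcode _h_get8_packet _h_asan_store1_noabort _h_vorbis_validate
  · exact h_start_decoder_9d Lay _hLay μ _hμ u₀ _hcode _h_error _h_get_bits
  · exact h_start_decoder_9e Lay _hLay μ _hμ u₀ _hcode _h_error _h_asan_store4_noabort _h_setup_malloc _h_asan_store8_noabort
  · exact h_start_decoder_9f Lay _hLay μ _hμ u₀ _hcode _h_error _h_asan_store4_noabort _h_setup_malloc _h_asan_store8_noabort _h_asan_load4_noabort _h_memset

end Vorbis.Spec.Splits
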